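-- pv_equiv track=rewrite | github.com/m1sterzer0/DaveProgrammingCompetitions | hackercup/python/2014/2_C.py | solve
-- ===== SOURCE A (Python) =====
-- MOD = 1_000_000_007
--
-- def solve(N,A) :
--     gr = [[] for _ in range(N) ]
--     for (i,a) in enumerate(A,start=1) : gr[a].append(i)
--     sb = [ [0] * N for _ in range(N) ]  ## sb[i][j] counts nodes in i's subtree less than or equal to j
--
--     ## Use Poor man's non-recursive DFS, to calculate the scoreboard
--     q = [(0,-1,0)]
--     while q :
--         (n,p,mode) = q.pop()
--         if mode == 0 :
--             q.append((n,p,1))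
--             for c in gr[n] : q.append((c,n,0))
--         else :
--             mysb = sb[n]
--             for i in range(n,N) : mysb[i] = 1
--             for c in gr[n] :
--                 csb = sb[c]
--                 for i in range(N) : mysb[i] += csb[i]    ##N^2 term
--
--     ## Use another ppor man's non-recursive DFS to calculate the ways
--     ways = 1
--     q = [(0,-1)]
--     while q :
--         (n,p) = q.pop()
--         if p >= 0 :
--             siblings = [x for x in gr[p] if x != n]  ##N^2 term
--             siblingcands = [sb[x][n] for x in siblings]
--             maincands = 1 + sum(siblingcands)
--             myways = pow(2,maincands,MOD) - 1
--             for c in siblingcands : myways -= pow(2,c,MOD)-1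
--             myways %= MOD
--             ways *= myways; ways %= MOD
--         for c in gr[n] : q.append((c,n))
--     return ways
-- ===== SOURCE B (Python) =====
-- MOD = 1_000_000_007
--
-- def solve(N, A):
--     children = [[] for _ in range(N)]
--     for i, a in enumerate(A, start=1):
--         children[a].append(i)
--     # preorder of the component of node 0, with an explicit stack
--     order = []
--     stack = [0]
--     while stack:
--         n = stack.pop()
--         order.append(n)
--         stack.extend(children[n])
--     # every child comes after its parent in preorder, so one reverse sweep
--     # builds the list of labels of each subtree (replaces A's N x N matrix)
--     subtree = [None] * N
--     for n in reversed(order):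
--         acc = [n]
--         for c in children[n]:
--             acc += subtree[c]
--         subtree[n] = acc
--     ways = 1
--     for n in order:
--         if n == 0:
--             continue
--         p = A[n - 1]
--         cands = [sum(1 for v in subtree[x] if v <= n) for x in children[p] if x != n]
--         f = pow(2, 1 + sum(cands), MOD) - 1
--         for c in cands:
--             f -= pow(2, c, MOD) - 1
--         ways = ways * f % MOD
--     return ways
-- ===== Notes on version B (the rewrite author's own statement) =====
-- stated objective: faster
-- what changed: Replaces A's N x N scoreboard matrix (filled by a mode-tagged DFS with per-node O(N) row merges) by per-subtree label lists built in one reverse sweep over an explicitly computed preorder, and counts candidates by scanning the sibling's (usually small) subtree list instead of indexing the dense matrix.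
-- outside the precondition, e.g. on solve(2, [1, 1]): A returns 1, B returns 1; on solve(3, [1, 1, 1]): A returns 1, B returns 1
import Mathlib
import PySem

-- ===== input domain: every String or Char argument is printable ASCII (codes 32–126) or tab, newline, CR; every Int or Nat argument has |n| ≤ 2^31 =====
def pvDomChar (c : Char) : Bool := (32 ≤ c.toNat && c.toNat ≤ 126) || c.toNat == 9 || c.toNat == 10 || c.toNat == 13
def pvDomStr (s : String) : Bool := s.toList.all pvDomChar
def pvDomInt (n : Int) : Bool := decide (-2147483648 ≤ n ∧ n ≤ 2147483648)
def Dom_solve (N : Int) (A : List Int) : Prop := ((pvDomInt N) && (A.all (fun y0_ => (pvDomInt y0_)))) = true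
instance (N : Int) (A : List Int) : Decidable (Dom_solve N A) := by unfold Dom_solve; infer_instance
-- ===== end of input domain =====

-- B replaces A's N×N scoreboard matrix by per-subtree label lists built in one
-- reverse sweep over an explicitly computed preorder (no mode-tagged stack),
-- and multiplies the per-node factors in a plain loop over that preorder.

-- ===== PORT A =====

def pyMOD : Int := 1000000007

-- Python list index for `children[a]` (both Pythons index the same way); exact for -Nn ≤ a < Nn
def pyIdxN (Nn : Nat) (a : Int) : Nat := (if a < 0 then a + Nn else a).toNat

-- `gr = [[] for _ in range(N)]`; `for (i,a) in enumerate(A,start=1): gr[a].append(i)`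
-- (the N empty rows are modelled as the everywhere-[] function; same line in both Pythons)
def buildGr (Nn : Nat) (A : List Int) : Nat → List Nat :=
  (PySem.List.enumerate A 1).foldl
    (fun gr ia => Function.update gr (pyIdxN Nn ia.2) (gr (pyIdxN Nn ia.2) ++ [ia.1.toNat]))
    (fun _ => [])

-- `for i in range(n,N): mysb[i] = 1`  (rows as functions Nat → Nat)
def rowOnes (Nn n : Nat) (v : Nat → Nat) : Nat → Nat :=
  (List.range' n (Nn - n)).foldl (fun v i => Function.update v i 1) v

-- `for i in range(N): mysb[i] += csb[i]`
def rowAdd (Nn : Nat) (csb : Nat → Nat) (v : Nat → Nat) : Nat → Nat :=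
  (List.range Nn).foldl (fun v i => Function.update v i (v i + csb i)) v

-- A's first poor-man's DFS; one fuel unit per `q.pop()` (fuel only makes the loop total)
def dfsA1 (gr : Nat → List Nat) (Nn : Nat) :
    Nat → List (Nat × Int × Nat) → (Nat → Nat → Nat) → (Nat → Nat → Nat)
  | 0, _, sb => sb
  | _ + 1, [], sb => sb
  | fuel + 1, (n, p, mode) :: q, sb =>
    if mode = 0 then
      dfsA1 gr Nn fuel ((gr n).reverse.map (fun c => (c, (n : Int), 0)) ++ (n, p, 1) :: q) sb
    else
      dfsA1 gr Nn fuel q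
        (Function.update sb n ((gr n).foldl (fun v c => rowAdd Nn (sb c) v) (rowOnes Nn n (sb n))))

-- A's second poor-man's DFS
def dfsA2 (gr : Nat → List Nat) (sb : Nat → Nat → Nat) : Nat → List (Nat × Int) → Int → Int
  | 0, _, w => w
  | _ + 1, [], w => w
  | fuel + 1, (n, p) :: q, w =>
    let w' :=
      if 0 ≤ p then
        let siblings := (gr p.toNat).filter (fun x => x ≠ n)
        let cands : List Nat := siblings.map (fun x => sb x n)
        let myways := cands.foldl (fun m c => m - (PySem.Int.powMod 2 c pyMOD - 1))
          (PySem.Int.powMod 2 (1 + cands.sum) pyMOD - 1)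
        PySem.Int.mod (w * PySem.Int.mod myways pyMOD) pyMOD
      else w
    dfsA2 gr sb fuel ((gr n).reverse.map (fun c => (c, (n : Int))) ++ q) w'

def solve (N : Int) (A : List Int) : Int :=
  let Nn := N.toNat
  let gr := buildGr Nn A
  let sb := dfsA1 gr Nn (2 * Nn + 1) [(0, -1, 0)] (fun _ _ => 0)
  dfsA2 gr sb (2 * Nn + 1) [(0, -1)] 1

-- ===== PORT B =====

-- `while stack: n = stack.pop(); order.append(n); stack.extend(children[n])`
def dfsB (ch : Nat → List Nat) : Nat → List Nat → List Nat → List Nat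
  | 0, _, order => order
  | _ + 1, [], order => order
  | fuel + 1, n :: stk, order => dfsB ch fuel ((ch n).reverse ++ stk) (order ++ [n])

def solve_alt (N : Int) (A : List Int) : Int :=
  let Nn := N.toNat
  let ch := buildGr Nn A
  let order := dfsB ch (Nn + 1) [0] []
  -- `for n in reversed(order): acc = [n]; for c in children[n]: acc += subtree[c]; subtree[n] = acc`
  let st := order.reverse.foldl
    (fun st n => Function.update st n ((ch n).foldl (fun acc c => acc ++ st c) [n]))
    (fun _ => ([] : List Nat))
  order.foldl
    (fun (w : Int) (n : Nat) =>
      if n = 0 then w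
      else
        let p := PySem.List.pyGetD A ((n : Int) - 1) 0
        let cands : List Nat := ((ch (pyIdxN Nn p)).filter (fun x => x ≠ n)).map
          (fun x => (st x).countP (fun v => v ≤ n))
        let f := cands.foldl (fun m c => m - (PySem.Int.powMod 2 c pyMOD - 1))
          (PySem.Int.powMod 2 (1 + cands.sum) pyMOD - 1)
        PySem.Int.mod (w * f) pyMOD)
    1

-- ===== PRECONDITION & SPEC =====

-- Pre_ is the input format A was written for: a parent list of length < N with
-- indices in [-N, N). Outside it A usually raises IndexError (an entry or a
-- reachable node label out of range); whether A returns on a list with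
-- len(A) >= N depends on which labels are reachable from node 0, a condition with
-- no closed form, so all such lists are excluded — on the excluded lists where A
-- does return, B returns the same value (see cites).
def Pre_solve (N : Int) (A : List Int) : Prop :=
  (A.length : Int) < N ∧ ∀ a ∈ A, -N ≤ a ∧ a < N

instance (N : Int) (A : List Int) : Decidable (Pre_solve N A) := by
  unfold Pre_solve; infer_instance

def pvWitness_solve : Int × List Int := (4, [0, 1, 1])

def Spec_solve (N : Int) (A : List Int) (out : Int) : Prop := out = solve_alt N A
instance (N : Int) (A : List Int) (out : Int) : Decidable (Spec_solve N A out) := by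
  unfold Spec_solve; infer_instance

-- ===== CLAIM (what is proved, stated in full; the proofs are below) =====
def Claim_equal_solve : Prop :=
  ∀ (N : Int) (A : List Int), Dom_solve N A → Pre_solve N A → Spec_solve N A (solve N A)

-- ===== LEMMAS AND PROOFS =====

-- Proof-side abbreviations: Ok bundles what Pre_ gives about (Nn = N.toNat, A).
def Ok (Nn : Nat) (A : List Int) : Prop :=
  A.length < Nn ∧ ∀ a ∈ A, -(Nn : Int) ≤ a ∧ a < (Nn : Int)

-- the parent function of the tree A encodes (nodes outside 1..len(A) are fixpoints)
def parF (Nn : Nat) (A : List Int) (i : Nat) : Nat :=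
  if 1 ≤ i ∧ i ≤ A.length then pyIdxN Nn (A.getD (i - 1) 0) else i

-- reachability from the root (parent chain ends at 0) and its length
abbrev Rch (par : Nat → Nat) (m : Nat) : Prop := ∃ d, par^[d] m = 0
def rnk (par : Nat → Nat) (m : Nat) (h : Rch par m) : Nat := Nat.find h
def Desc (par : Nat → Nat) (x m : Nat) : Prop := ∃ d, par^[d] m = x

-- subtree label lists, fuel-indexed: Lf in child-list order, Tf in stack pop order
def Lf (gr : Nat → List Nat) : Nat → Nat → List Nat
  | 0, n => [n]
  | k + 1, n => n :: (gr n).flatMap (Lf gr k)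
def Tf (gr : Nat → List Nat) : Nat → Nat → List Nat
  | 0, n => [n]
  | k + 1, n => n :: ((gr n).reverse).flatMap (Tf gr k)

-- the recursion dfsA1's stack machine implements
def procAf (gr : Nat → List Nat) (Nn : Nat) : Nat → Nat → (Nat → Nat → Nat) → (Nat → Nat → Nat)
  | 0, _, sb => sb
  | k + 1, n, sb =>
    let sb' := ((gr n).reverse).foldl (fun s c => procAf gr Nn k c s) sb
    Function.update sb' n ((gr n).foldl (fun v c => rowAdd Nn (sb' c) v) (rowOnes Nn n (sb' n)))

-- what a finished scoreboard row says: sb[x][j] = #{v in subtree(x) | v ≤ j}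
def rowSpec (gr : Nat → List Nat) (Nn x : Nat) : Nat → Nat :=
  fun j => if j < Nn then (Lf gr Nn x).countP (fun v => v ≤ j) else 0

-- the per-node multiplication both programs perform
def stepF (gr : Nat → List Nat) (par : Nat → Nat) (sb : Nat → Nat → Nat) (w : Int) (n : Nat) : Int :=
  let cands := ((gr (par n)).filter (fun x => x ≠ n)).map (fun x => sb x n)
  let myways := cands.foldl (fun m c => m - (PySem.Int.powMod 2 c pyMOD - 1))
    (PySem.Int.powMod 2 (1 + cands.sum) pyMOD - 1)
  PySem.Int.mod (w * PySem.Int.mod myways pyMOD) pyMOD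


-- ---- adjacency characterization ----

lemma buildGr_apply (Nn : Nat) (A : List Int) (x : Nat) :
    buildGr Nn A x
      = (List.range' 1 A.length).filter (fun i => pyIdxN Nn (A.getD (i - 1) 0) = x) := by
  induction A using List.reverseRecOn generalizing x with
  | nil => rfl
  | append_singleton B a ih =>
    have key : buildGr Nn (B ++ [a])
        = Function.update (buildGr Nn B) (pyIdxN Nn a)
            (buildGr Nn B (pyIdxN Nn a) ++ [(1 + (B.length : Int)).toNat]) := by
      unfold buildGr
      rw [PySem.List.enumerate_append, List.foldl_append]
      simp [PySem.List.enumerate]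
    rw [key]
    have hlen : (B ++ [a]).length = B.length + 1 := by simp
    rw [hlen, List.range'_concat, List.filter_append]
    have hfirst :
        (List.range' 1 B.length).filter
            (fun i => pyIdxN Nn ((B ++ [a]).getD (i - 1) 0) = x)
          = (List.range' 1 B.length).filter
            (fun i => pyIdxN Nn (B.getD (i - 1) 0) = x) := by
      apply List.filter_congr
      intro i hi
      have hi' : 1 ≤ i ∧ i < 1 + B.length := List.mem_range'_1.mp hi
      rw [List.getD_append _ _ _ _ (by omega)]
    rw [hfirst]
    have hlast : (B ++ [a]).getD (1 + 1 * B.length - 1) 0 = a := by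
      have h1 : 1 + 1 * B.length - 1 = B.length := by omega
      rw [h1, List.getD_append_right _ _ _ _ (Nat.le_refl _)]
      simp
    have htoNat : (1 + (B.length : Int)).toNat = 1 + 1 * B.length := by omega
    by_cases hx : pyIdxN Nn a = x
    · subst hx
      rw [Function.update_apply, if_pos rfl, ih]
      have : (List.filter (fun i => decide (pyIdxN Nn ((B ++ [a]).getD (i - 1) 0) = pyIdxN Nn a))
          [1 + 1 * B.length]) = [1 + 1 * B.length] := by
        simp
      rw [this, htoNat]
    · rw [Function.update_apply, if_neg (fun hh => hx hh.symm), ih]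
      have : (List.filter (fun i => decide (pyIdxN Nn ((B ++ [a]).getD (i - 1) 0) = x))
          [1 + 1 * B.length]) = [] := by
        simp [hx]
      rw [this, List.append_nil]

lemma mem_buildGr (Nn : Nat) (A : List Int) (x c : Nat) :
    c ∈ buildGr Nn A x ↔ (1 ≤ c ∧ c ≤ A.length ∧ parF Nn A c = x) := by
  rw [buildGr_apply, List.mem_filter]
  constructor
  · rintro ⟨hr, hp⟩
    have hr' := List.mem_range'_1.mp hr
    have h12 : 1 ≤ c ∧ c ≤ A.length := by omega
    refine ⟨h12.1, h12.2, ?_⟩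
    unfold parF
    rw [if_pos h12]
    exact of_decide_eq_true hp
  · rintro ⟨h1, h2, hp⟩
    have hp' : pyIdxN Nn (A.getD (c - 1) 0) = x := by
      unfold parF at hp; rwa [if_pos ⟨h1, h2⟩] at hp
    exact ⟨List.mem_range'_1.mpr (by omega), by simpa using hp'⟩

lemma nodup_buildGr (Nn : Nat) (A : List Int) (x : Nat) : (buildGr Nn A x).Nodup := by
  rw [buildGr_apply]; exact (List.nodup_range' 1).filter _

lemma parF_big (Nn : Nat) (A : List Int) (i : Nat) (h : A.length < i ∨ i = 0) :
    parF Nn A i = i := by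
  unfold parF; rw [if_neg]; omega

-- ---- parent-chain facts ----

lemma iter_fix (par : Nat → Nat) (v : Nat) (hv : par v = v) : ∀ t, par^[t] v = v := by
  intro t; induction t with
  | zero => rfl
  | succ t ih => rw [Function.iterate_succ_apply, hv]; exact ih

lemma parF_zero (Nn : Nat) (A : List Int) : parF Nn A 0 = 0 := parF_big Nn A 0 (Or.inr rfl)

lemma rch_elem_bound (Nn : Nat) (A : List Int) (m : Nat) (h : Rch (parF Nn A) m) :
    ∀ s, (parF Nn A)^[s] m = 0 ∨ (parF Nn A)^[s] m ≤ A.length := by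
  intro s
  by_contra hcon
  have hne : ¬(parF Nn A)^[s] m = 0 := fun hh => hcon (Or.inl hh)
  have hgt : A.length < (parF Nn A)^[s] m := by
    rcases Nat.lt_or_ge A.length ((parF Nn A)^[s] m) with hh | hh
    · exact hh
    · exact absurd (Or.inr hh) hcon
  have hfix : parF Nn A ((parF Nn A)^[s] m) = (parF Nn A)^[s] m :=
    parF_big Nn A _ (Or.inl hgt)
  obtain ⟨d, hd⟩ := h
  rcases Nat.le_total d s with hds | hsd
  · have : (parF Nn A)^[s] m = (parF Nn A)^[s - d] ((parF Nn A)^[d] m) := by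
      rw [← Function.iterate_add_apply, Nat.sub_add_cancel hds]
    rw [hd] at this
    rw [iter_fix _ 0 (parF_zero Nn A) _] at this
    exact hne this
  · have : (parF Nn A)^[d] m = (parF Nn A)^[d - s] ((parF Nn A)^[s] m) := by
      rw [← Function.iterate_add_apply, Nat.sub_add_cancel hsd]
    rw [iter_fix _ _ hfix _] at this
    rw [hd] at this
    exact hne this.symm

lemma rnk_spec (par : Nat → Nat) (m : Nat) (h : Rch par m) : par^[rnk par m h] m = 0 :=
  Nat.find_spec h

lemma rnk_min (par : Nat → Nat) (m : Nat) (h : Rch par m) {d : Nat}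
    (hd : d < rnk par m h) : par^[d] m ≠ 0 := Nat.find_min h hd

lemma rch_zero (par : Nat → Nat) : Rch par 0 := ⟨0, rfl⟩

lemma rch_child (par : Nat → Nat) (c x : Nat) (hpc : par c = x) (hx : Rch par x) :
    Rch par c := by
  obtain ⟨d, hd⟩ := hx
  exact ⟨d + 1, by rw [Function.iterate_succ_apply, hpc]; exact hd⟩

lemma rnk_child (par : Nat → Nat) (c x : Nat) (hpc : par c = x) (hc0 : c ≠ 0)
    (hx : Rch par x) (hc : Rch par c) : rnk par c hc = rnk par x hx + 1 := by
  show Nat.find hc = rnk par x hx + 1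
  rw [Nat.find_eq_iff]
  constructor
  · rw [Function.iterate_succ_apply, hpc]; exact rnk_spec par x hx
  · intro d hd
    match d with
    | 0 => simpa using hc0
    | e + 1 =>
      rw [Function.iterate_succ_apply, hpc]
      exact rnk_min par x hx (by omega)

lemma rch_iter (par : Nat → Nat) (h0 : par 0 = 0) (m : Nat) (h : Rch par m) (s : Nat) :
    Rch par (par^[s] m) := by
  obtain ⟨d, hd⟩ := h
  rcases Nat.le_total s d with hs | hs
  · exact ⟨d - s, by rw [← Function.iterate_add_apply, Nat.sub_add_cancel hs]; exact hd⟩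
  · refine ⟨0, ?_⟩
    have : par^[s] m = par^[s - d] (par^[d] m) := by
      rw [← Function.iterate_add_apply, Nat.sub_add_cancel hs]
    rw [this, hd]
    exact iter_fix par 0 h0 _

lemma rnk_iter (par : Nat → Nat) (m : Nat) (h : Rch par m) (s : Nat)
    (hs : s ≤ rnk par m h) (hs' : Rch par (par^[s] m)) :
    rnk par (par^[s] m) hs' = rnk par m h - s := by
  show Nat.find hs' = rnk par m h - s
  rw [Nat.find_eq_iff]
  constructor
  · rw [← Function.iterate_add_apply, Nat.sub_add_cancel hs]
    exact rnk_spec par m h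
  · intro d hd
    rw [← Function.iterate_add_apply]
    exact rnk_min par m h (by omega)

lemma rnk_lt (Nn : Nat) (A : List Int) (ok : Ok Nn A) (m : Nat)
    (h : Rch (parF Nn A) m) : rnk (parF Nn A) m h < Nn := by
  set par := parF Nn A with hpar
  set d := rnk par m h with hd
  have hnd : ((List.range (d + 1)).map (fun s => par^[s] m)).Nodup := by
    refine List.Nodup.map_on ?_ (List.nodup_range)
    intro x hx y hy hxy
    rw [List.mem_range] at hx hy
    by_contra hne
    rcases Nat.lt_or_ge x y with hlt | hge
    · have h0 : par^[d] m = 0 := rnk_spec par m h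
      have : par^[d] m = par^[d - y] (par^[y] m) := by
        rw [← Function.iterate_add_apply, Nat.sub_add_cancel (by omega)]
      rw [← hxy, ← Function.iterate_add_apply] at this
      have hlt2 : d - y + x < d := by omega
      exact rnk_min par m h hlt2 (by rw [← this]; exact h0)
    · have hlt : y < x := by omega
      have h0 : par^[d] m = 0 := rnk_spec par m h
      have : par^[d] m = par^[d - x] (par^[x] m) := by
        rw [← Function.iterate_add_apply, Nat.sub_add_cancel (by omega)]
      rw [hxy, ← Function.iterate_add_apply] at this
      have hlt2 : d - x + y < d := by omega
      exact rnk_min par m h hlt2 (by rw [← this]; exact h0)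
  have hNn := ok.1
  have hsub : ((List.range (d + 1)).map (fun s => par^[s] m)) ⊆ List.range Nn := by
    intro v hv
    rw [List.mem_map] at hv
    obtain ⟨s, _, hs⟩ := hv
    have hs' : par^[s] m = v := hs
    rw [List.mem_range]
    rcases rch_elem_bound Nn A m h s with h0 | hle2
    · rw [hpar] at hs'; omega
    · rw [hpar] at hs'; omega
  have hle := (hnd.subperm hsub).length_le
  simp at hle
  omega


-- ---- subtree lists: stability, lengths, counts ----

lemma flatMap_congr_mem {α β : Type} (l : List α) (f g : α → List β)
    (h : ∀ c ∈ l, f c = g c) : l.flatMap f = l.flatMap g := by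
  induction l with
  | nil => rfl
  | cons c t ih =>
    simp only [List.flatMap_cons]
    rw [h c (List.mem_cons_self), ih (fun c hc => h c (List.mem_cons_of_mem _ hc))]

lemma Lf_stable (Nn : Nat) (A : List Int) (ok : Ok Nn A) :
    ∀ k k' x (hx : Rch (parF Nn A) x), x = 0 ∨ x ≤ A.length →
      Nn - rnk (parF Nn A) x hx ≤ k → Nn - rnk (parF Nn A) x hx ≤ k' →
      Lf (buildGr Nn A) k x = Lf (buildGr Nn A) k' x := by
  intro k
  induction k with
  | zero =>
    intro k' x hx hb hk hk'
    have := rnk_lt Nn A ok x hx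
    omega
  | succ k ih =>
    intro k' x hx hb hk hk'
    have hrk := rnk_lt Nn A ok x hx
    match k' with
    | 0 => omega
    | k'' + 1 =>
      show x :: _ = x :: _
      congr 1
      apply flatMap_congr_mem
      intro c hc
      obtain ⟨hc1, hc2, hcp⟩ := (mem_buildGr Nn A x c).mp hc
      have hrc : Rch (parF Nn A) c := rch_child _ c x hcp hx
      have hrnkc : rnk (parF Nn A) c hrc = rnk (parF Nn A) x hx + 1 :=
        rnk_child _ c x hcp (by omega) hx hrc
      exact ih k'' c hrc (Or.inr hc2) (by omega) (by omega)

lemma Tf_stable (Nn : Nat) (A : List Int) (ok : Ok Nn A) :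
    ∀ k k' x (hx : Rch (parF Nn A) x), x = 0 ∨ x ≤ A.length →
      Nn - rnk (parF Nn A) x hx ≤ k → Nn - rnk (parF Nn A) x hx ≤ k' →
      Tf (buildGr Nn A) k x = Tf (buildGr Nn A) k' x := by
  intro k
  induction k with
  | zero =>
    intro k' x hx hb hk hk'
    have := rnk_lt Nn A ok x hx
    omega
  | succ k ih =>
    intro k' x hx hb hk hk'
    have hrk := rnk_lt Nn A ok x hx
    match k' with
    | 0 => omega
    | k'' + 1 =>
      show x :: _ = x :: _
      congr 1
      apply flatMap_congr_mem
      intro c hc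
      rw [List.mem_reverse] at hc
      obtain ⟨hc1, hc2, hcp⟩ := (mem_buildGr Nn A x c).mp hc
      have hrc : Rch (parF Nn A) c := rch_child _ c x hcp hx
      have hrnkc : rnk (parF Nn A) c hrc = rnk (parF Nn A) x hx + 1 :=
        rnk_child _ c x hcp (by omega) hx hrc
      exact ih k'' c hrc (Or.inr hc2) (by omega) (by omega)

lemma length_Tf_eq (gr : Nat → List Nat) :
    ∀ k x, (Tf gr k x).length = (Lf gr k x).length := by
  intro k
  induction k with
  | zero => intro x; rfl
  | succ k ih =>
    intro x
    show (x :: _).length = (x :: _).length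
    simp only [List.length_cons, List.length_flatMap]
    congr 1
    have : (gr x).reverse.map (fun a => (Tf gr k a).length)
        = ((gr x).map (fun a => (Lf gr k a).length)).reverse := by
      rw [← List.map_reverse]
      apply List.map_congr_left
      intro c _
      exact ih c
    rw [this, List.sum_reverse]

lemma count_Tf_eq (gr : Nat → List Nat) :
    ∀ k x m, (Tf gr k x).count m = (Lf gr k x).count m := by
  intro k
  induction k with
  | zero => intro x m; rfl
  | succ k ih =>
    intro x m
    show ((x : Nat) :: _).count m = ((x : Nat) :: _).count m
    simp only [List.count_cons, List.count_flatMap]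
    congr 1
    have : (gr x).reverse.map (List.count m ∘ Tf gr k)
        = ((gr x).map (List.count m ∘ Lf gr k)).reverse := by
      rw [← List.map_reverse]
      apply List.map_congr_left
      intro c _
      exact ih c m
    rw [this, List.sum_reverse]

lemma sum_map_indicator {l : List Nat} {f : Nat → Nat} {c0 : Nat}
    (hc0 : c0 ∈ l) (hnd : l.Nodup) (hf : ∀ c ∈ l, f c = if c = c0 then 1 else 0) :
    (l.map f).sum = 1 := by
  induction l with
  | nil => cases hc0
  | cons c t ih =>
    rcases List.mem_cons.mp hc0 with rfl | hc0t
    · simp only [List.map_cons, List.sum_cons, hf c List.mem_cons_self]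
      have : ∀ y ∈ t.map f, y = 0 := by
        intro y hy
        rw [List.mem_map] at hy
        obtain ⟨c', hc', rfl⟩ := hy
        rw [hf c' (List.mem_cons_of_mem _ hc')]
        rw [if_neg]
        intro hh; subst hh
        exact (List.nodup_cons.mp hnd).1 hc'
      rw [List.sum_eq_zero this, hf c0 List.mem_cons_self]
      simp
    · have hcne : c ≠ c0 := by
        intro hh; subst hh
        exact (List.nodup_cons.mp hnd).1 hc0t
      simp only [List.map_cons, List.sum_cons, hf c List.mem_cons_self, if_neg hcne]
      rw [ih hc0t (List.nodup_cons.mp hnd).2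
        (fun c' hc' => hf c' (List.mem_cons_of_mem _ hc'))]


lemma desc_of_child (par : Nat → Nat) (x c m : Nat) (hc : par c = x) :
    Desc par c m → Desc par x m := by
  rintro ⟨d, hd⟩
  exact ⟨d + 1, by rw [Function.iterate_succ_apply', hd, hc]⟩

lemma rch_of_desc (par : Nat → Nat) (x m : Nat) (hx : Rch par x) :
    Desc par x m → Rch par m := by
  rintro ⟨d, hd⟩
  obtain ⟨e, he⟩ := hx
  exact ⟨e + d, by rw [Function.iterate_add_apply, hd]; exact he⟩

-- a child of x never has x in its own subtree
lemma not_desc_child (Nn : Nat) (A : List Int) (ok : Ok Nn A) (x c : Nat)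
    (hx : Rch (parF Nn A) x) (hc : c ∈ buildGr Nn A x) : ¬ Desc (parF Nn A) c x := by
  set par := parF Nn A with hpardef
  obtain ⟨h1, h2, hp⟩ := (mem_buildGr Nn A x c).mp hc
  have hrc : Rch par c := rch_child par c x hp hx
  have e1 : rnk par c hrc = rnk par x hx + 1 := rnk_child par c x hp (by omega) hx hrc
  rintro ⟨d, hd⟩
  by_cases hdr : d ≤ rnk par x hx
  · have hri : Rch par (par^[d] x) := rch_iter par (parF_zero Nn A) x hx d
    have e2 : rnk par (par^[d] x) hri = rnk par x hx - d := rnk_iter par x hx d hdr hri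
    have hceq : c = par^[d] x := hd.symm
    subst hceq
    have e3 : rnk par (par^[d] x) hri = rnk par (par^[d] x) hrc := rfl
    omega
  · have h0 : par^[d] x = 0 := by
      have hsplit : par^[d] x = par^[d - rnk par x hx] (par^[rnk par x hx] x) := by
        rw [← Function.iterate_add_apply, Nat.sub_add_cancel (by omega)]
      rw [rnk_spec par x hx] at hsplit
      rw [iter_fix par 0 (parF_zero Nn A) _] at hsplit
      exact hsplit
    omega

-- if m lies strictly below x, exactly one child of x has m in its subtree
lemma desc_unique_child (Nn : Nat) (A : List Int) (ok : Ok Nn A) (x m : Nat)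
    (hx : Rch (parF Nn A) x) (hb : x = 0 ∨ x ≤ A.length)
    (hdesc : Desc (parF Nn A) x m) (hxm : x ≠ m) :
    ∃ c0 ∈ buildGr Nn A x, Desc (parF Nn A) c0 m ∧
      ∀ c ∈ buildGr Nn A x, Desc (parF Nn A) c m → c = c0 := by
  set par := parF Nn A with hpardef
  have hrm : Rch par m := rch_of_desc par x m hx hdesc
  have hd0 : ∃ d, par^[d] m = x := hdesc
  set d := Nat.find hd0 with hddef
  have hdspec : par^[d] m = x := Nat.find_spec hd0
  have hdmin : ∀ e < d, par^[e] m ≠ x := fun e he => Nat.find_min hd0 he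
  have hdne : d ≠ 0 := by
    intro hh
    rw [hh] at hdspec
    exact hxm hdspec.symm
  set t := d - 1 with htdef
  set c0 := par^[t] m with hc0def
  have hpc0 : par c0 = x := by
    rw [hc0def, ← Function.iterate_succ_apply' par t m]
    have htd : t.succ = d := by omega
    rw [htd]
    exact hdspec
  have hc0ne : c0 ≠ 0 := by
    intro hh
    have hx0 : x = 0 := by rw [← hpc0, hh, hpardef]; exact parF_zero Nn A
    refine hdmin t (by omega) ?_
    show par^[t] m = x
    rw [← hc0def, hh, hx0]
  have hc0le : c0 ≤ A.length := by
    rcases rch_elem_bound Nn A m hrm t with h0 | hle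
    · exact absurd h0 hc0ne
    · exact hle
  have hc0mem : c0 ∈ buildGr Nn A x :=
    (mem_buildGr Nn A x c0).mpr ⟨by omega, hc0le, hpc0⟩
  refine ⟨c0, hc0mem, ⟨t, rfl⟩, ?_⟩
  intro c hc hdc
  obtain ⟨h1, h2, hp⟩ := (mem_buildGr Nn A x c).mp hc
  have hrc : Rch par c := rch_child par c x hp hx
  have hrc0 : Rch par c0 := rch_child par c0 x hpc0 hx
  have e1 : rnk par c hrc = rnk par x hx + 1 := rnk_child par c x hp (by omega) hx hrc
  have e2 : rnk par c0 hrc0 = rnk par x hx + 1 := rnk_child par c0 x hpc0 (by omega) hx hrc0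
  obtain ⟨e, he⟩ := hdc
  have helt : e < rnk par m hrm := by
    by_contra hge
    have h0 : par^[e] m = 0 := by
      have hsplit : par^[e] m = par^[e - rnk par m hrm] (par^[rnk par m hrm] m) := by
        rw [← Function.iterate_add_apply, Nat.sub_add_cancel (by omega)]
      rw [rnk_spec par m hrm] at hsplit
      rw [iter_fix par 0 (parF_zero Nn A) _] at hsplit
      exact hsplit
    omega
  have htlt : t < rnk par m hrm := by
    by_contra hge
    have h0 : par^[t] m = 0 := by
      have hsplit : par^[t] m = par^[t - rnk par m hrm] (par^[rnk par m hrm] m) := by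
        rw [← Function.iterate_add_apply, Nat.sub_add_cancel (by omega)]
      rw [rnk_spec par m hrm] at hsplit
      rw [iter_fix par 0 (parF_zero Nn A) _] at hsplit
      exact hsplit
    exact hc0ne (by rw [hc0def, h0])
  have hrie : Rch par (par^[e] m) := rch_iter par (parF_zero Nn A) m hrm e
  have hrit : Rch par (par^[t] m) := rch_iter par (parF_zero Nn A) m hrm t
  have e3 : rnk par (par^[e] m) hrie = rnk par m hrm - e := rnk_iter par m hrm e (by omega) hrie
  have e4 : rnk par (par^[t] m) hrit = rnk par m hrm - t := rnk_iter par m hrm t (by omega) hrit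
  have hce : c = par^[e] m := he.symm
  have hc0t : c0 = par^[t] m := rfl
  subst hce
  have e5 : rnk par (par^[e] m) hrie = rnk par (par^[e] m) hrc := rfl
  have e6 : rnk par (par^[t] m) hrit = rnk par c0 hrc0 := rfl
  have het : e = t := by omega
  rw [hc0t, ← het]

-- every element of a subtree list has the root of that subtree on its parent chain,
-- exactly once
lemma count_Lf (Nn : Nat) (A : List Int) (ok : Ok Nn A) :
    ∀ k x (hx : Rch (parF Nn A) x), x = 0 ∨ x ≤ A.length →
      Nn - rnk (parF Nn A) x hx ≤ k → ∀ m : Nat,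
      (Desc (parF Nn A) x m → (Lf (buildGr Nn A) k x).count m = 1) ∧
      (¬ Desc (parF Nn A) x m → (Lf (buildGr Nn A) k x).count m = 0) := by
  intro k
  induction k with
  | zero =>
    intro x hx hb hk m
    have := rnk_lt Nn A ok x hx
    omega
  | succ k ih =>
    intro x hx hb hk m
    have hrk := rnk_lt Nn A ok x hx
    have hcount : (Lf (buildGr Nn A) (k + 1) x).count m
        = (((buildGr Nn A) x).map (fun c => (Lf (buildGr Nn A) k c).count m)).sum + (if x = m then 1 else 0) := by
      show (x :: ((buildGr Nn A) x).flatMap (Lf (buildGr Nn A) k)).count m = _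
      rw [List.count_cons, List.count_flatMap]
      simp [Function.comp_def]
    have hchild : ∀ c ∈ (buildGr Nn A) x, ∃ (hrc : Rch (parF Nn A) c),
        1 ≤ c ∧ c ≤ A.length ∧ parF Nn A c = x ∧ rnk (parF Nn A) c hrc = rnk (parF Nn A) x hx + 1 := by
      intro c hc
      obtain ⟨h1, h2, hp⟩ := (mem_buildGr Nn A x c).mp hc
      have hrc : Rch (parF Nn A) c := rch_child (parF Nn A) c x hp hx
      exact ⟨hrc, h1, h2, hp, rnk_child (parF Nn A) c x hp (by omega) hx hrc⟩
    constructor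
    · intro hdesc
      by_cases hxm : x = m
      · subst hxm
        rw [hcount, if_pos rfl]
        have hall : ∀ y ∈ ((buildGr Nn A) x).map (fun c => (Lf (buildGr Nn A) k c).count x), y = 0 := by
          intro y hy
          obtain ⟨c, hc, rfl⟩ := List.mem_map.mp hy
          obtain ⟨hrc, h1, h2, hp, e1⟩ := hchild c hc
          exact (ih c hrc (Or.inr h2) (by omega) x).2 (not_desc_child Nn A ok x c hx hc)
        rw [List.sum_eq_zero hall]
      · rw [hcount, if_neg hxm]
        obtain ⟨c0, hc0mem, hc0desc, hc0uniq⟩ :=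
          desc_unique_child Nn A ok x m hx hb hdesc hxm
        obtain ⟨hrc0, h01, h02, h0p, e0⟩ := hchild c0 hc0mem
        have hone : (((buildGr Nn A) x).map (fun c => (Lf (buildGr Nn A) k c).count m)).sum = 1 := by
          apply sum_map_indicator hc0mem (nodup_buildGr Nn A x)
          intro c hc
          obtain ⟨hrc, h1, h2, hp, e1⟩ := hchild c hc
          by_cases hcc : c = c0
          · subst hcc
            rw [if_pos rfl]
            exact (ih c hrc (Or.inr h2) (by omega) m).1 hc0desc
          · rw [if_neg hcc]
            refine (ih c hrc (Or.inr h2) (by omega) m).2 ?_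
            intro hdc
            exact hcc (hc0uniq c hc hdc)
        rw [hone]
    · intro hndesc
      have hxm : x ≠ m := by
        intro hh; subst hh; exact hndesc ⟨0, rfl⟩
      rw [hcount, if_neg hxm]
      have hall : ∀ y ∈ ((buildGr Nn A) x).map (fun c => (Lf (buildGr Nn A) k c).count m), y = 0 := by
        intro y hy
        obtain ⟨c, hc, rfl⟩ := List.mem_map.mp hy
        obtain ⟨hrc, h1, h2, hp, e1⟩ := hchild c hc
        refine (ih c hrc (Or.inr h2) (by omega) m).2 ?_
        intro hdc
        exact hndesc (desc_of_child (parF Nn A) x c m hp hdc)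
      rw [List.sum_eq_zero hall]

-- membership form
lemma mem_Lf_iff (Nn : Nat) (A : List Int) (ok : Ok Nn A)
    (k x : Nat) (hx : Rch (parF Nn A) x) (hb : x = 0 ∨ x ≤ A.length)
    (hk : Nn - rnk (parF Nn A) x hx ≤ k) (m : Nat) :
    m ∈ Lf (buildGr Nn A) k x ↔ Desc (parF Nn A) x m := by
  constructor
  · intro hm
    by_cases hd : Desc (parF Nn A) x m
    · exact hd
    · have := (count_Lf Nn A ok k x hx hb hk m).2 hd
      rw [List.count_eq_zero] at this
      exact absurd hm this
  · intro hd
    have := (count_Lf Nn A ok k x hx hb hk m).1 hd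
    rw [← List.count_pos_iff]
    omega

lemma mem_Tf_iff (Nn : Nat) (A : List Int) (ok : Ok Nn A)
    (k x : Nat) (hx : Rch (parF Nn A) x) (hb : x = 0 ∨ x ≤ A.length)
    (hk : Nn - rnk (parF Nn A) x hx ≤ k) (m : Nat) :
    m ∈ Tf (buildGr Nn A) k x ↔ Desc (parF Nn A) x m := by
  rw [← mem_Lf_iff Nn A ok k x hx hb hk m, ← List.count_pos_iff, ← List.count_pos_iff,
    count_Tf_eq]

-- the root's subtree list has at most Nn (distinct) labels
lemma length_Lf_root_le (Nn : Nat) (A : List Int) (ok : Ok Nn A) (k : Nat)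
    (hk : Nn - rnk (parF Nn A) 0 (rch_zero _) ≤ k) :
    (Lf (buildGr Nn A) k 0).length ≤ Nn := by
  have hnd : (Lf (buildGr Nn A) k 0).Nodup := by
    rw [List.nodup_iff_count_le_one]
    intro a
    by_cases hd : Desc (parF Nn A) 0 a
    · rw [(count_Lf Nn A ok k 0 (rch_zero _) (Or.inl rfl) hk a).1 hd]
    · rw [(count_Lf Nn A ok k 0 (rch_zero _) (Or.inl rfl) hk a).2 hd]; omega
  have hsub : Lf (buildGr Nn A) k 0 ⊆ List.range Nn := by
    intro m hm
    have hd := (mem_Lf_iff Nn A ok k 0 (rch_zero _) (Or.inl rfl) hk m).mp hm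
    have hrm : Rch (parF Nn A) m := rch_of_desc _ 0 m (rch_zero _) hd
    rcases rch_elem_bound Nn A m hrm 0 with h0 | hle
    · rw [List.mem_range]; simp at h0; have := ok.1; omega
    · rw [List.mem_range]; simp at hle; have := ok.1; omega
  simpa using (hnd.subperm hsub).length_le


-- ---- row value lemmas ----

lemma foldl_update_ones (b : Nat) :
    ∀ (a : Nat) (v : Nat → Nat) (j : Nat),
      ((List.range' a b).foldl (fun v i => Function.update v i 1) v) j
        = if a ≤ j ∧ j < a + b then 1 else v j := by
  induction b with
  | zero => intro a v j; rw [if_neg (by omega)]; rfl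
  | succ b ih =>
    intro a v j
    rw [List.range'_succ, List.foldl_cons, ih]
    rw [Function.update_apply]
    split_ifs <;> omega

lemma rowOnes_apply (Nn n : Nat) (v : Nat → Nat) (j : Nat) :
    rowOnes Nn n v j = if n ≤ j ∧ j < Nn then 1 else v j := by
  unfold rowOnes
  rw [foldl_update_ones]
  split_ifs <;> first | rfl | omega

lemma rowAdd_apply (Nn : Nat) (csb v : Nat → Nat) (j : Nat) :
    rowAdd Nn csb v j = if j < Nn then v j + csb j else v j := by
  unfold rowAdd
  induction Nn with
  | zero => rw [if_neg (by omega)]; rfl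
  | succ b ih =>
    rw [List.range_succ, List.foldl_append, List.foldl_cons, List.foldl_nil]
    rw [Function.update_apply]
    by_cases hj : j = b
    · subst hj
      rw [if_pos rfl, if_pos (by omega), ih, if_neg (by omega)]
    · rw [if_neg hj, ih]
      split_ifs <;> first | rfl | omega

lemma foldl_rowAdd_apply (Nn : Nat) (f : Nat → Nat → Nat) :
    ∀ (l : List Nat) (v : Nat → Nat) (j : Nat),
      ((l.foldl (fun v c => rowAdd Nn (f c) v) v) j)
        = if j < Nn then v j + (l.map (fun c => f c j)).sum else v j := by
  intro l
  induction l with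
  | nil => intro v j; simp
  | cons c t ih =>
    intro v j
    rw [List.foldl_cons, ih, List.map_cons, List.sum_cons]
    rw [rowAdd_apply]
    split_ifs <;> omega

-- ---- one-step unfolding of the subtree lists at full fuel ----

lemma Lf_unfold (Nn : Nat) (A : List Int) (ok : Ok Nn A) (x : Nat)
    (hx : Rch (parF Nn A) x) (hb : x = 0 ∨ x ≤ A.length) :
    Lf (buildGr Nn A) Nn x = x :: (buildGr Nn A x).flatMap (fun c => Lf (buildGr Nn A) Nn c) := by
  have hNn : 1 ≤ Nn := by have := ok.1; omega
  obtain ⟨Nn', rfl⟩ : ∃ Nn', Nn = Nn' + 1 := ⟨Nn - 1, by omega⟩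
  show (x : Nat) :: _ = _
  congr 1
  apply flatMap_congr_mem
  intro c hc
  obtain ⟨h1, h2, hp⟩ := (mem_buildGr _ A x c).mp hc
  have hrc : Rch (parF (Nn' + 1) A) c := rch_child _ c x hp hx
  have e1 : rnk _ c hrc = rnk _ x hx + 1 := rnk_child _ c x hp (by omega) hx hrc
  have := rnk_lt _ A ok c hrc
  exact Lf_stable _ A ok Nn' (Nn' + 1) c hrc (Or.inr h2) (by omega) (by omega)

lemma Tf_unfold (Nn : Nat) (A : List Int) (ok : Ok Nn A) (x : Nat)
    (hx : Rch (parF Nn A) x) (hb : x = 0 ∨ x ≤ A.length) :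
    Tf (buildGr Nn A) Nn x
      = x :: (buildGr Nn A x).reverse.flatMap (fun c => Tf (buildGr Nn A) Nn c) := by
  have hNn : 1 ≤ Nn := by have := ok.1; omega
  obtain ⟨Nn', rfl⟩ : ∃ Nn', Nn = Nn' + 1 := ⟨Nn - 1, by omega⟩
  show (x : Nat) :: _ = _
  congr 1
  apply flatMap_congr_mem
  intro c hc
  rw [List.mem_reverse] at hc
  obtain ⟨h1, h2, hp⟩ := (mem_buildGr _ A x c).mp hc
  have hrc : Rch (parF (Nn' + 1) A) c := rch_child _ c x hp hx
  have e1 : rnk _ c hrc = rnk _ x hx + 1 := rnk_child _ c x hp (by omega) hx hrc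
  have := rnk_lt _ A ok c hrc
  exact Tf_stable _ A ok Nn' (Nn' + 1) c hrc (Or.inr h2) (by omega) (by omega)

-- ---- the scoreboard row a subtree should carry, and its recurrence ----

lemma rowSpec_rec (Nn : Nat) (A : List Int) (ok : Ok Nn A) (x : Nat)
    (hx : Rch (parF Nn A) x) (hb : x = 0 ∨ x ≤ A.length) (j : Nat) (hj : j < Nn) :
    rowSpec (buildGr Nn A) Nn x j
      = (if x ≤ j then 1 else 0)
        + ((buildGr Nn A x).map (fun c => rowSpec (buildGr Nn A) Nn c j)).sum := by
  unfold rowSpec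
  rw [if_pos hj, Lf_unfold Nn A ok x hx hb, List.countP_cons, List.countP_flatMap]
  have : (buildGr Nn A x).map (List.countP (fun v => decide (v ≤ j)) ∘ fun c => Lf (buildGr Nn A) Nn c)
      = (buildGr Nn A x).map (fun c => if j < Nn then (Lf (buildGr Nn A) Nn c).countP (fun v => decide (v ≤ j)) else 0) := by
    apply List.map_congr_left
    intro c _
    rw [if_pos hj]
    rfl
  rw [this]
  simp only [decide_eq_true_eq]
  omega

-- ---- disjointness of sibling subtrees ----

lemma not_mem_Lf_child (Nn : Nat) (A : List Int) (ok : Ok Nn A) (x c k : Nat)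
    (hx : Rch (parF Nn A) x) (hc : c ∈ buildGr Nn A x)
    (hk : ∀ (hrc : Rch (parF Nn A) c), Nn - rnk (parF Nn A) c hrc ≤ k) :
    x ∉ Lf (buildGr Nn A) k c := by
  obtain ⟨h1, h2, hp⟩ := (mem_buildGr Nn A x c).mp hc
  have hrc : Rch (parF Nn A) c := rch_child _ c x hp hx
  intro hm
  exact not_desc_child Nn A ok x c hx hc
    ((mem_Lf_iff Nn A ok k c hrc (Or.inr h2) (hk hrc) x).mp hm)

lemma disjoint_siblings (Nn : Nat) (A : List Int) (ok : Ok Nn A) (x c c' k k' m : Nat)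
    (hx : Rch (parF Nn A) x) (hb : x = 0 ∨ x ≤ A.length)
    (hc : c ∈ buildGr Nn A x) (hc' : c' ∈ buildGr Nn A x) (hne : c ≠ c')
    (hkk : ∀ (hrc : Rch (parF Nn A) c), Nn - rnk (parF Nn A) c hrc ≤ k)
    (hkk' : ∀ (hrc : Rch (parF Nn A) c'), Nn - rnk (parF Nn A) c' hrc ≤ k')
    (hm : m ∈ Lf (buildGr Nn A) k c) : m ∉ Lf (buildGr Nn A) k' c' := by
  obtain ⟨h1, h2, hp⟩ := (mem_buildGr Nn A x c).mp hc
  obtain ⟨h1', h2', hp'⟩ := (mem_buildGr Nn A x c').mp hc'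
  have hrc : Rch (parF Nn A) c := rch_child _ c x hp hx
  have hrc' : Rch (parF Nn A) c' := rch_child _ c' x hp' hx
  have hdc : Desc (parF Nn A) c m :=
    (mem_Lf_iff Nn A ok k c hrc (Or.inr h2) (hkk hrc) m).mp hm
  intro hm'
  have hdc' : Desc (parF Nn A) c' m :=
    (mem_Lf_iff Nn A ok k' c' hrc' (Or.inr h2') (hkk' hrc') m).mp hm'
  have hdxm : Desc (parF Nn A) x m := desc_of_child _ x c m hp hdc
  have hxm : x ≠ m := by
    intro hh; subst hh
    exact not_desc_child Nn A ok x c hx hc hdc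
  obtain ⟨c0, hc0mem, _, huniq⟩ := desc_unique_child Nn A ok x m hx hb hdxm hxm
  have := huniq c hc hdc
  have := huniq c' hc' hdc'
  omega


-- x is in its own subtree list
lemma self_mem_Lf (gr : Nat → List Nat) (k m : Nat) : m ∈ Lf gr k m := by
  cases k with
  | zero => exact List.mem_singleton.mpr rfl
  | succ k => exact List.mem_cons_self

lemma mem_Lf_of_child (Nn : Nat) (A : List Int) (ok : Ok Nn A) (x c m : Nat)
    (hx : Rch (parF Nn A) x) (hb : x = 0 ∨ x ≤ A.length)
    (hc : c ∈ buildGr Nn A x) (hm : m ∈ Lf (buildGr Nn A) Nn c) :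
    m ∈ Lf (buildGr Nn A) Nn x := by
  obtain ⟨h1, h2, hp⟩ := (mem_buildGr Nn A x c).mp hc
  have hrc : Rch (parF Nn A) c := rch_child _ c x hp hx
  have hd := (mem_Lf_iff Nn A ok Nn c hrc (Or.inr h2) (by omega) m).mp hm
  exact (mem_Lf_iff Nn A ok Nn x hx hb (by omega) m).mpr (desc_of_child _ x c m hp hd)

-- the first DFS's recursion: untouched rows stay, processed rows become rowSpec
lemma procAf_spec (Nn : Nat) (A : List Int) (ok : Ok Nn A) :
    ∀ k x (hx : Rch (parF Nn A) x), (x = 0 ∨ x ≤ A.length) →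
      Nn - rnk (parF Nn A) x hx ≤ k →
      ∀ sb : Nat → Nat → Nat, (∀ m ∈ Lf (buildGr Nn A) Nn x, sb m = fun _ => 0) →
      (∀ r, r ∉ Lf (buildGr Nn A) Nn x → procAf (buildGr Nn A) Nn k x sb r = sb r) ∧
      (∀ m ∈ Lf (buildGr Nn A) Nn x, procAf (buildGr Nn A) Nn k x sb m
          = rowSpec (buildGr Nn A) Nn m) := by
  intro k
  induction k with
  | zero =>
    intro x hx hb hk sb hz
    have := rnk_lt Nn A ok x hx
    omega
  | succ k ih =>
    intro x hx hb hk sb hz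
    have hrk := rnk_lt Nn A ok x hx
    have hchild : ∀ c ∈ buildGr Nn A x, ∃ (hrc : Rch (parF Nn A) c),
        1 ≤ c ∧ c ≤ A.length ∧ parF Nn A c = x
          ∧ rnk (parF Nn A) c hrc = rnk (parF Nn A) x hx + 1 := by
      intro c hc
      obtain ⟨h1, h2, hp⟩ := (mem_buildGr Nn A x c).mp hc
      have hrc : Rch (parF Nn A) c := rch_child _ c x hp hx
      exact ⟨hrc, h1, h2, hp, rnk_child _ c x hp (by omega) hx hrc⟩
    -- the children fold
    have aux : ∀ cs : List Nat, cs.Nodup → (∀ c ∈ cs, c ∈ buildGr Nn A x) →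
        ∀ sb0 : Nat → Nat → Nat,
          (∀ c ∈ cs, ∀ m ∈ Lf (buildGr Nn A) Nn c, sb0 m = fun _ => 0) →
          (∀ r, (∀ c ∈ cs, r ∉ Lf (buildGr Nn A) Nn c) →
            (cs.foldl (fun s c => procAf (buildGr Nn A) Nn k c s) sb0) r = sb0 r) ∧
          (∀ c ∈ cs, ∀ m ∈ Lf (buildGr Nn A) Nn c,
            (cs.foldl (fun s c => procAf (buildGr Nn A) Nn k c s) sb0) m
              = rowSpec (buildGr Nn A) Nn m) := by
      intro cs
      induction cs with
      | nil => intro _ _ sb0 _; exact ⟨fun r _ => rfl, fun c hc => absurd hc (List.not_mem_nil)⟩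
      | cons c t iht =>
        intro hnd hmem sb0 hz0
        obtain ⟨hrc, h1, h2, hp, e1⟩ := hchild c (hmem c List.mem_cons_self)
        have hkc : Nn - rnk (parF Nn A) c hrc ≤ k := by omega
        obtain ⟨huc, hvc⟩ := ih c hrc (Or.inr h2) hkc sb0 (hz0 c List.mem_cons_self)
        have hz1 : ∀ c' ∈ t, ∀ m ∈ Lf (buildGr Nn A) Nn c', procAf (buildGr Nn A) Nn k c sb0 m = fun _ => 0 := by
          intro c' hc' m hm
          have hne : c ≠ c' := by
            intro hh; subst hh; exact (List.nodup_cons.mp hnd).1 hc'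
          have hnotin : m ∉ Lf (buildGr Nn A) Nn c :=
            disjoint_siblings Nn A ok x c' c Nn Nn m hx hb
              (hmem c' (List.mem_cons_of_mem _ hc')) (hmem c List.mem_cons_self)
              (fun hh => hne hh.symm) (fun _ => by omega) (fun _ => by omega) hm
          rw [huc m hnotin]
          exact hz0 c' (List.mem_cons_of_mem _ hc') m hm
        obtain ⟨hut, hvt⟩ := iht (List.nodup_cons.mp hnd).2
          (fun c' hc' => hmem c' (List.mem_cons_of_mem _ hc'))
          (procAf (buildGr Nn A) Nn k c sb0) hz1
        rw [List.foldl_cons]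
        refine ⟨?_, ?_⟩
        · intro r hr
          rw [hut r (fun c' hc' => hr c' (List.mem_cons_of_mem _ hc'))]
          exact huc r (hr c List.mem_cons_self)
        · intro c' hc' m hm
          rcases List.mem_cons.mp hc' with rfl | hc't
          · have hnott : ∀ c'' ∈ t, m ∉ Lf (buildGr Nn A) Nn c'' := by
              intro c'' hc'' hmm
              have hne : c' ≠ c'' := by
                intro hh; subst hh; exact (List.nodup_cons.mp hnd).1 hc''
              exact disjoint_siblings Nn A ok x c' c'' Nn Nn m hx hb
                (hmem c' List.mem_cons_self) (hmem c'' (List.mem_cons_of_mem _ hc''))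
                hne (fun _ => by omega) (fun _ => by omega) hm hmm
            rw [hut m hnott]
            exact hvc m hm
          · exact hvt c' hc't m hm
    have hndrev : (buildGr Nn A x).reverse.Nodup := by
      rw [List.nodup_reverse]; exact nodup_buildGr Nn A x
    have hmemrev : ∀ c ∈ (buildGr Nn A x).reverse, c ∈ buildGr Nn A x := by
      intro c hc; rwa [List.mem_reverse] at hc
    have hz0 : ∀ c ∈ (buildGr Nn A x).reverse, ∀ m ∈ Lf (buildGr Nn A) Nn c,
        sb m = fun _ => 0 := by
      intro c hc m hm
      exact hz m (mem_Lf_of_child Nn A ok x c m hx hb (hmemrev c hc) hm)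
    obtain ⟨hu, hv⟩ := aux (buildGr Nn A x).reverse hndrev hmemrev sb hz0
    set sb' := ((buildGr Nn A x).reverse).foldl (fun s c => procAf (buildGr Nn A) Nn k c s) sb with hsb'
    have hxnot : ∀ c ∈ buildGr Nn A x, x ∉ Lf (buildGr Nn A) Nn c := by
      intro c hc
      exact not_mem_Lf_child Nn A ok x c Nn hx hc (fun _ => by omega)
    have hsbx : sb' x = sb x := by
      apply hu
      intro c hc
      exact hxnot c (hmemrev c hc)
    have hsbx0 : sb' x = fun _ => 0 := by
      rw [hsbx]; exact hz x (self_mem_Lf _ _ _)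
    have hunfold : procAf (buildGr Nn A) Nn (k + 1) x sb
        = Function.update sb' x ((buildGr Nn A x).foldl (fun v c => rowAdd Nn (sb' c) v)
            (rowOnes Nn x (sb' x))) := rfl
    rw [hunfold]
    constructor
    · intro r hr
      have hrx : r ≠ x := by
        intro hh; subst hh; exact hr (self_mem_Lf _ _ _)
      rw [Function.update_apply, if_neg hrx]
      apply hu
      intro c hc
      intro hmm
      exact hr (mem_Lf_of_child Nn A ok x c r hx hb (hmemrev c hc) hmm)
    · intro m hm
      rw [Lf_unfold Nn A ok x hx hb] at hm
      rcases List.mem_cons.mp hm with rfl | hmf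
      · rw [Function.update_apply, if_pos rfl]
        funext j
        rw [foldl_rowAdd_apply]
        by_cases hj : j < Nn
        · rw [if_pos hj, rowOnes_apply, hsbx0]
          have hmapeq : (buildGr Nn A m).map (fun c => sb' c j)
              = (buildGr Nn A m).map (fun c => rowSpec (buildGr Nn A) Nn c j) := by
            apply List.map_congr_left
            intro c hc
            have : sb' c = rowSpec (buildGr Nn A) Nn c := by
              apply hv c (by rwa [List.mem_reverse])
              exact self_mem_Lf _ _ _
            rw [this]
          rw [hmapeq, rowSpec_rec Nn A ok m hx hb j hj]
          beta_reduce
          split_ifs <;> omega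
        · rw [if_neg hj, rowOnes_apply, if_neg (by omega), hsbx0]
          unfold rowSpec
          rw [if_neg hj]
      · obtain ⟨c, hc, hmc⟩ := List.mem_flatMap.mp hmf
        have hmx : m ≠ x := by
          intro hh; subst hh
          exact hxnot c hc hmc
        rw [Function.update_apply, if_neg hmx]
        exact hv c (by rwa [List.mem_reverse]) m hmc


-- ---- the first DFS implements procAf ----

lemma dfsA1_nil (gr : Nat → List Nat) (Nn : Nat) (fuel : Nat) (sb : Nat → Nat → Nat) :
    dfsA1 gr Nn fuel [] sb = sb := by
  cases fuel <;> rfl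

lemma length_Lf_pos (gr : Nat → List Nat) (k x : Nat) : 1 ≤ (Lf gr k x).length := by
  cases k <;> simp [Lf]

lemma length_Lf_rec (Nn : Nat) (A : List Int) (ok : Ok Nn A) (x : Nat)
    (hx : Rch (parF Nn A) x) (hb : x = 0 ∨ x ≤ A.length) :
    (Lf (buildGr Nn A) Nn x).length
      = 1 + ((buildGr Nn A x).map (fun c => (Lf (buildGr Nn A) Nn c).length)).sum := by
  rw [Lf_unfold Nn A ok x hx hb]
  simp [List.length_flatMap]
  omega

lemma dfs1_comp (Nn : Nat) (A : List Int) (ok : Ok Nn A) :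
    ∀ k x (hx : Rch (parF Nn A) x), (x = 0 ∨ x ≤ A.length) →
      Nn - rnk (parF Nn A) x hx ≤ k →
      ∀ (p : Int) (q : List (Nat × Int × Nat)) (sb : Nat → Nat → Nat) (fuel : Nat),
      dfsA1 (buildGr Nn A) Nn (fuel + 2 * (Lf (buildGr Nn A) Nn x).length) ((x, p, 0) :: q) sb
        = dfsA1 (buildGr Nn A) Nn fuel q (procAf (buildGr Nn A) Nn k x sb) := by
  intro k
  induction k with
  | zero =>
    intro x hx hb hk
    have := rnk_lt Nn A ok x hx
    omega
  | succ k ih =>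
    intro x hx hb hk p q sb fuel
    have hrk := rnk_lt Nn A ok x hx
    have hchild : ∀ c ∈ buildGr Nn A x, ∃ (hrc : Rch (parF Nn A) c),
        1 ≤ c ∧ c ≤ A.length ∧ parF Nn A c = x
          ∧ rnk (parF Nn A) c hrc = rnk (parF Nn A) x hx + 1 := by
      intro c hc
      obtain ⟨h1, h2, hp⟩ := (mem_buildGr Nn A x c).mp hc
      have hrc : Rch (parF Nn A) c := rch_child _ c x hp hx
      exact ⟨hrc, h1, h2, hp, rnk_child _ c x hp (by omega) hx hrc⟩
    have aux : ∀ cs : List Nat, (∀ c ∈ cs, c ∈ buildGr Nn A x) →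
        ∀ (q' : List (Nat × Int × Nat)) (sb0 : Nat → Nat → Nat) (fuel' : Nat),
        dfsA1 (buildGr Nn A) Nn
            (fuel' + (cs.map (fun c => 2 * (Lf (buildGr Nn A) Nn c).length)).sum)
            (cs.map (fun c => (c, (x : Int), (0 : Nat))) ++ q') sb0
          = dfsA1 (buildGr Nn A) Nn fuel' q'
              (cs.foldl (fun s c => procAf (buildGr Nn A) Nn k c s) sb0) := by
      intro cs
      induction cs with
      | nil => intro _ q' sb0 fuel'; rfl
      | cons c t iht =>
        intro hmem q' sb0 fuel'
        obtain ⟨hrc, h1, h2, hp, e1⟩ := hchild c (hmem c List.mem_cons_self)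
        have hfuel : fuel' + ((c :: t).map (fun c => 2 * (Lf (buildGr Nn A) Nn c).length)).sum
            = (fuel' + (t.map (fun c => 2 * (Lf (buildGr Nn A) Nn c).length)).sum)
              + 2 * (Lf (buildGr Nn A) Nn c).length := by
          simp [List.map_cons, List.sum_cons]; omega
        rw [hfuel, List.map_cons, List.cons_append]
        rw [ih c hrc (Or.inr h2) (by omega) (x : Int) (t.map (fun c => (c, (x : Int), (0 : Nat))) ++ q') sb0
          (fuel' + (t.map (fun c => 2 * (Lf (buildGr Nn A) Nn c).length)).sum)]
        rw [iht (fun c' hc' => hmem c' (List.mem_cons_of_mem _ hc'))]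
        rfl
    -- pop (x,p,0)
    have hlen := length_Lf_rec Nn A ok x hx hb
    have hS : ((buildGr Nn A x).reverse.map (fun c => 2 * (Lf (buildGr Nn A) Nn c).length)).sum
        = ((buildGr Nn A x).map (fun c => 2 * (Lf (buildGr Nn A) Nn c).length)).sum := by
      rw [List.map_reverse, List.sum_reverse]
    have hS2 : ((buildGr Nn A x).map (fun c => 2 * (Lf (buildGr Nn A) Nn c).length)).sum
        = 2 * ((buildGr Nn A x).map (fun c => (Lf (buildGr Nn A) Nn c).length)).sum := by
      rw [← List.sum_map_mul_left]
    have hfuel1 : fuel + 2 * (Lf (buildGr Nn A) Nn x).length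
        = ((fuel + 1 + ((buildGr Nn A x).reverse.map
            (fun c => 2 * (Lf (buildGr Nn A) Nn c).length)).sum)) + 1 := by
      rw [hS, hS2]; omega
    rw [hfuel1]
    show dfsA1 (buildGr Nn A) Nn _ (((x, p, 0) : Nat × Int × Nat) :: q) sb = _
    rw [dfsA1]
    rw [if_pos rfl]
    rw [aux (buildGr Nn A x).reverse (fun c hc => by rwa [List.mem_reverse] at hc)
      ((x, p, 1) :: q) sb (fuel + 1)]
    rw [dfsA1]
    rw [if_neg (by omega)]
    rfl

-- full first-DFS run: the final scoreboard rows of reachable nodes are rowSpec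
lemma sbF_spec (Nn : Nat) (A : List Int) (ok : Ok Nn A) (m : Nat)
    (hm : m ∈ Lf (buildGr Nn A) Nn 0) :
    dfsA1 (buildGr Nn A) Nn (2 * Nn + 1) [(0, -1, 0)] (fun _ _ => 0) m
      = rowSpec (buildGr Nn A) Nn m := by
  have hL := length_Lf_root_le Nn A ok Nn (by omega)
  have hfuel : 2 * Nn + 1 = (2 * Nn + 1 - 2 * (Lf (buildGr Nn A) Nn 0).length)
      + 2 * (Lf (buildGr Nn A) Nn 0).length := by omega
  rw [hfuel, dfs1_comp Nn A ok Nn 0 (rch_zero _) (Or.inl rfl) (by omega) (-1) [] _ _,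
    dfsA1_nil]
  exact (procAf_spec Nn A ok Nn 0 (rch_zero _) (Or.inl rfl) (by omega)
    (fun _ _ => 0) (fun _ _ => rfl)).2 m hm


-- ---- the second DFS multiplies stepF over the visit order ----

lemma dfsA2_nil (gr : Nat → List Nat) (sb : Nat → Nat → Nat) (fuel : Nat) (w : Int) :
    dfsA2 gr sb fuel [] w = w := by
  cases fuel <;> rfl

lemma length_Tf_rec (Nn : Nat) (A : List Int) (ok : Ok Nn A) (x : Nat)
    (hx : Rch (parF Nn A) x) (hb : x = 0 ∨ x ≤ A.length) :
    (Tf (buildGr Nn A) Nn x).length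
      = 1 + ((buildGr Nn A x).reverse.map (fun c => (Tf (buildGr Nn A) Nn c).length)).sum := by
  rw [Tf_unfold Nn A ok x hx hb]
  simp [List.length_flatMap]
  omega

lemma dfs2_comp (Nn : Nat) (A : List Int) (ok : Ok Nn A) (sb : Nat → Nat → Nat) :
    ∀ k x (hx : Rch (parF Nn A) x), 1 ≤ x → x ≤ A.length →
      Nn - rnk (parF Nn A) x hx ≤ k →
      ∀ (q : List (Nat × Int)) (w : Int) (fuel : Nat),
      dfsA2 (buildGr Nn A) sb (fuel + (Tf (buildGr Nn A) Nn x).length)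
          ((x, (parF Nn A x : Int)) :: q) w
        = dfsA2 (buildGr Nn A) sb fuel q
            ((Tf (buildGr Nn A) Nn x).foldl (stepF (buildGr Nn A) (parF Nn A) sb) w) := by
  intro k
  induction k with
  | zero =>
    intro x hx h1 h2 hk
    have := rnk_lt Nn A ok x hx
    omega
  | succ k ih =>
    intro x hx h1 h2 hk q w fuel
    have hrk := rnk_lt Nn A ok x hx
    have hchild : ∀ c ∈ buildGr Nn A x, ∃ (hrc : Rch (parF Nn A) c),
        1 ≤ c ∧ c ≤ A.length ∧ parF Nn A c = x
          ∧ rnk (parF Nn A) c hrc = rnk (parF Nn A) x hx + 1 := by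
      intro c hc
      obtain ⟨hh1, hh2, hp⟩ := (mem_buildGr Nn A x c).mp hc
      have hrc : Rch (parF Nn A) c := rch_child _ c x hp hx
      exact ⟨hrc, hh1, hh2, hp, rnk_child _ c x hp (by omega) hx hrc⟩
    have aux : ∀ cs : List Nat, (∀ c ∈ cs, c ∈ buildGr Nn A x) →
        ∀ (q' : List (Nat × Int)) (w' : Int) (fuel' : Nat),
        dfsA2 (buildGr Nn A) sb
            (fuel' + (cs.map (fun c => (Tf (buildGr Nn A) Nn c).length)).sum)
            (cs.map (fun c => (c, (x : Int))) ++ q') w'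
          = dfsA2 (buildGr Nn A) sb fuel' q'
              (cs.foldl (fun w'' c =>
                (Tf (buildGr Nn A) Nn c).foldl (stepF (buildGr Nn A) (parF Nn A) sb) w'') w') := by
      intro cs
      induction cs with
      | nil => intro _ q' w' fuel'; rfl
      | cons c t iht =>
        intro hmem q' w' fuel'
        obtain ⟨hrc, hh1, hh2, hp, e1⟩ := hchild c (hmem c List.mem_cons_self)
        have hfuel : fuel' + ((c :: t).map (fun c => (Tf (buildGr Nn A) Nn c).length)).sum
            = (fuel' + (t.map (fun c => (Tf (buildGr Nn A) Nn c).length)).sum)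
              + (Tf (buildGr Nn A) Nn c).length := by
          simp [List.map_cons, List.sum_cons]; omega
        rw [hfuel, List.map_cons, List.cons_append]
        rw [show ((c, (x : Int)) : Nat × Int) = (c, (parF Nn A c : Int)) by rw [hp]]
        rw [ih c hrc hh1 hh2 (by omega)]
        rw [iht (fun c' hc' => hmem c' (List.mem_cons_of_mem _ hc'))]
        rfl
    -- pop (x, par x)
    have hlen := length_Tf_rec Nn A ok x hx (Or.inr h2)
    have hfuel1 : fuel + (Tf (buildGr Nn A) Nn x).length
        = ((fuel + ((buildGr Nn A x).reverse.map
            (fun c => (Tf (buildGr Nn A) Nn c).length)).sum)) + 1 := by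
      omega
    rw [hfuel1]
    show dfsA2 (buildGr Nn A) sb _ (((x, (parF Nn A x : Int)) : Nat × Int) :: q) w = _
    rw [dfsA2]
    rw [if_pos (by positivity)]
    rw [aux (buildGr Nn A x).reverse (fun c hc => by rwa [List.mem_reverse] at hc) q _ fuel]
    congr 1
    rw [Tf_unfold Nn A ok x hx (Or.inr h2), List.foldl_cons, List.foldl_flatMap]
    rfl

-- pushing a list of children of x and folding them off
lemma dfs2_children (Nn : Nat) (A : List Int) (ok : Ok Nn A) (sb : Nat → Nat → Nat)
    (x : Nat) (hx : Rch (parF Nn A) x) :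
    ∀ cs : List Nat, (∀ c ∈ cs, c ∈ buildGr Nn A x) →
      ∀ (q : List (Nat × Int)) (w : Int) (fuel : Nat),
      dfsA2 (buildGr Nn A) sb
          (fuel + (cs.map (fun c => (Tf (buildGr Nn A) Nn c).length)).sum)
          (cs.map (fun c => (c, (x : Int))) ++ q) w
        = dfsA2 (buildGr Nn A) sb fuel q
            ((cs.flatMap (fun c => Tf (buildGr Nn A) Nn c)).foldl
              (stepF (buildGr Nn A) (parF Nn A) sb) w) := by
  intro cs
  induction cs with
  | nil => intro _ q w fuel; rfl
  | cons c t iht =>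
    intro hmem q w fuel
    obtain ⟨hh1, hh2, hp⟩ := (mem_buildGr Nn A x c).mp (hmem c List.mem_cons_self)
    have hrc : Rch (parF Nn A) c := rch_child _ c x hp hx
    have hfuel : fuel + ((c :: t).map (fun c => (Tf (buildGr Nn A) Nn c).length)).sum
        = (fuel + (t.map (fun c => (Tf (buildGr Nn A) Nn c).length)).sum)
          + (Tf (buildGr Nn A) Nn c).length := by
      simp [List.map_cons, List.sum_cons]; omega
    rw [hfuel, List.map_cons, List.cons_append]
    rw [show ((c, (x : Int)) : Nat × Int) = (c, (parF Nn A c : Int)) by rw [hp]]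
    rw [dfs2_comp Nn A ok sb Nn c hrc hh1 hh2 (by omega)]
    rw [iht (fun c' hc' => hmem c' (List.mem_cons_of_mem _ hc'))]
    rw [List.flatMap_cons, List.foldl_append]

-- ---- B's explicit-stack preorder is Tf ----

lemma dfsB_nil (ch : Nat → List Nat) (fuel : Nat) (order : List Nat) :
    dfsB ch fuel [] order = order := by
  cases fuel <;> rfl

lemma dfsB_comp (Nn : Nat) (A : List Int) (ok : Ok Nn A) :
    ∀ k x (hx : Rch (parF Nn A) x), (x = 0 ∨ x ≤ A.length) →
      Nn - rnk (parF Nn A) x hx ≤ k →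
      ∀ (stk acc : List Nat) (fuel : Nat),
      dfsB (buildGr Nn A) (fuel + (Tf (buildGr Nn A) Nn x).length) (x :: stk) acc
        = dfsB (buildGr Nn A) fuel stk (acc ++ Tf (buildGr Nn A) Nn x) := by
  intro k
  induction k with
  | zero =>
    intro x hx hb hk
    have := rnk_lt Nn A ok x hx
    omega
  | succ k ih =>
    intro x hx hb hk stk acc fuel
    have hrk := rnk_lt Nn A ok x hx
    have hchild : ∀ c ∈ buildGr Nn A x, ∃ (hrc : Rch (parF Nn A) c),
        1 ≤ c ∧ c ≤ A.length ∧ parF Nn A c = x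
          ∧ rnk (parF Nn A) c hrc = rnk (parF Nn A) x hx + 1 := by
      intro c hc
      obtain ⟨hh1, hh2, hp⟩ := (mem_buildGr Nn A x c).mp hc
      have hrc : Rch (parF Nn A) c := rch_child _ c x hp hx
      exact ⟨hrc, hh1, hh2, hp, rnk_child _ c x hp (by omega) hx hrc⟩
    have aux : ∀ cs : List Nat, (∀ c ∈ cs, c ∈ buildGr Nn A x) →
        ∀ (stk' acc' : List Nat) (fuel' : Nat),
        dfsB (buildGr Nn A)
            (fuel' + (cs.map (fun c => (Tf (buildGr Nn A) Nn c).length)).sum)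
            (cs ++ stk') acc'
          = dfsB (buildGr Nn A) fuel' stk'
              (acc' ++ cs.flatMap (fun c => Tf (buildGr Nn A) Nn c)) := by
      intro cs
      induction cs with
      | nil => intro _ stk' acc' fuel'; simp
      | cons c t iht =>
        intro hmem stk' acc' fuel'
        obtain ⟨hrc, hh1, hh2, hp, e1⟩ := hchild c (hmem c List.mem_cons_self)
        have hfuel : fuel' + ((c :: t).map (fun c => (Tf (buildGr Nn A) Nn c).length)).sum
            = (fuel' + (t.map (fun c => (Tf (buildGr Nn A) Nn c).length)).sum)
              + (Tf (buildGr Nn A) Nn c).length := by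
          simp [List.map_cons, List.sum_cons]; omega
        rw [hfuel, List.cons_append]
        rw [ih c hrc (Or.inr hh2) (by omega)]
        rw [iht (fun c' hc' => hmem c' (List.mem_cons_of_mem _ hc'))]
        rw [List.flatMap_cons, List.append_assoc]
    have hlen := length_Tf_rec Nn A ok x hx hb
    have hfuel1 : fuel + (Tf (buildGr Nn A) Nn x).length
        = ((fuel + ((buildGr Nn A x).reverse.map
            (fun c => (Tf (buildGr Nn A) Nn c).length)).sum)) + 1 := by
      omega
    rw [hfuel1]
    show dfsB (buildGr Nn A) (_ + 1) (x :: stk) acc = _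
    rw [dfsB]
    rw [aux (buildGr Nn A x).reverse (fun c hc => by rwa [List.mem_reverse] at hc) stk (acc ++ [x])]
    rw [Tf_unfold Nn A ok x hx hb]
    rw [List.append_assoc]
    rfl


-- ---- B's reverse sweep computes the subtree lists ----

lemma sweep_spec (Nn : Nat) (A : List Int) (ok : Ok Nn A) :
    ∀ k x (hx : Rch (parF Nn A) x), (x = 0 ∨ x ≤ A.length) →
      Nn - rnk (parF Nn A) x hx ≤ k →
      ∀ st0 : Nat → List Nat,
      (∀ r, r ∉ Lf (buildGr Nn A) Nn x →
        ((Tf (buildGr Nn A) Nn x).reverse.foldl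
          (fun st n => Function.update st n
            ((buildGr Nn A n).foldl (fun acc c => acc ++ st c) [n])) st0) r = st0 r) ∧
      (∀ m ∈ Lf (buildGr Nn A) Nn x,
        ((Tf (buildGr Nn A) Nn x).reverse.foldl
          (fun st n => Function.update st n
            ((buildGr Nn A n).foldl (fun acc c => acc ++ st c) [n])) st0) m
          = Lf (buildGr Nn A) Nn m) := by
  intro k
  induction k with
  | zero =>
    intro x hx hb hk
    have := rnk_lt Nn A ok x hx
    omega
  | succ k ih =>
    intro x hx hb hk st0
    have hrk := rnk_lt Nn A ok x hx
    have hchild : ∀ c ∈ buildGr Nn A x, ∃ (hrc : Rch (parF Nn A) c),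
        1 ≤ c ∧ c ≤ A.length ∧ parF Nn A c = x
          ∧ rnk (parF Nn A) c hrc = rnk (parF Nn A) x hx + 1 := by
      intro c hc
      obtain ⟨hh1, hh2, hp⟩ := (mem_buildGr Nn A x c).mp hc
      have hrc : Rch (parF Nn A) c := rch_child _ c x hp hx
      exact ⟨hrc, hh1, hh2, hp, rnk_child _ c x hp (by omega) hx hrc⟩
    have hrev : (Tf (buildGr Nn A) Nn x).reverse
        = ((buildGr Nn A x).flatMap (fun c => (Tf (buildGr Nn A) Nn c).reverse)) ++ [x] := by
      rw [Tf_unfold Nn A ok x hx hb, List.reverse_cons, List.reverse_flatMap,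
        List.reverse_reverse]
      rfl
    have hfold : ∀ s : Nat → List Nat,
        (((buildGr Nn A x).flatMap (fun c => (Tf (buildGr Nn A) Nn c).reverse)).foldl
          (fun st n => Function.update st n
            ((buildGr Nn A n).foldl (fun acc c => acc ++ st c) [n])) s)
        = ((buildGr Nn A x).foldl (fun s c => (Tf (buildGr Nn A) Nn c).reverse.foldl
            (fun st n => Function.update st n
              ((buildGr Nn A n).foldl (fun acc c => acc ++ st c) [n])) s) s) := by
      intro s
      rw [List.foldl_flatMap]
    have aux : ∀ cs : List Nat, cs.Nodup → (∀ c ∈ cs, c ∈ buildGr Nn A x) →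
        ∀ s0 : Nat → List Nat,
        (∀ r, (∀ c ∈ cs, r ∉ Lf (buildGr Nn A) Nn c) →
          (cs.foldl (fun s c => (Tf (buildGr Nn A) Nn c).reverse.foldl
            (fun st n => Function.update st n
              ((buildGr Nn A n).foldl (fun acc c => acc ++ st c) [n])) s) s0) r = s0 r) ∧
        (∀ c ∈ cs, ∀ m ∈ Lf (buildGr Nn A) Nn c,
          (cs.foldl (fun s c => (Tf (buildGr Nn A) Nn c).reverse.foldl
            (fun st n => Function.update st n
              ((buildGr Nn A n).foldl (fun acc c => acc ++ st c) [n])) s) s0) m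
            = Lf (buildGr Nn A) Nn m) := by
      intro cs
      induction cs with
      | nil => intro _ _ s0; exact ⟨fun r _ => rfl, fun c hc => absurd hc (List.not_mem_nil)⟩
      | cons c t iht =>
        intro hnd hmem s0
        obtain ⟨hrc, hh1, hh2, hp, e1⟩ := hchild c (hmem c List.mem_cons_self)
        have hkc : Nn - rnk (parF Nn A) c hrc ≤ k := by omega
        obtain ⟨huc, hvc⟩ := ih c hrc (Or.inr hh2) hkc s0
        obtain ⟨hut, hvt⟩ := iht (List.nodup_cons.mp hnd).2
          (fun c' hc' => hmem c' (List.mem_cons_of_mem _ hc')) _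
        rw [List.foldl_cons]
        refine ⟨?_, ?_⟩
        · intro r hr
          rw [hut r (fun c' hc' => hr c' (List.mem_cons_of_mem _ hc'))]
          exact huc r (hr c List.mem_cons_self)
        · intro c' hc' m hm
          rcases List.mem_cons.mp hc' with rfl | hc't
          · have hnott : ∀ c'' ∈ t, m ∉ Lf (buildGr Nn A) Nn c'' := by
              intro c'' hc'' hmm
              have hne : c' ≠ c'' := by
                intro hh; subst hh; exact (List.nodup_cons.mp hnd).1 hc''
              exact disjoint_siblings Nn A ok x c' c'' Nn Nn m hx hb
                (hmem c' List.mem_cons_self) (hmem c'' (List.mem_cons_of_mem _ hc''))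
                hne (fun _ => by omega) (fun _ => by omega) hm hmm
            rw [hut m hnott]
            exact hvc m hm
          · exact hvt c' hc't m hm
    obtain ⟨hu, hv⟩ := aux (buildGr Nn A x) (nodup_buildGr Nn A x) (fun c hc => hc) st0
    have hxnot : ∀ c ∈ buildGr Nn A x, x ∉ Lf (buildGr Nn A) Nn c := by
      intro c hc
      exact not_mem_Lf_child Nn A ok x c Nn hx hc (fun _ => by omega)
    have hVAL : ((buildGr Nn A x).foldl (fun acc c => acc ++
        ((buildGr Nn A x).foldl (fun s c => (Tf (buildGr Nn A) Nn c).reverse.foldl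
          (fun st n => Function.update st n
            ((buildGr Nn A n).foldl (fun acc c => acc ++ st c) [n])) s) st0) c) [x])
        = Lf (buildGr Nn A) Nn x := by
      rw [PySem.List.foldl_append_eq_flatMap]
      rw [flatMap_congr_mem _ _ (fun c => Lf (buildGr Nn A) Nn c)
        (fun c hc => hv c hc c (self_mem_Lf _ _ _))]
      rw [Lf_unfold Nn A ok x hx hb]
      rfl
    rw [hrev]
    constructor
    · intro r hr
      rw [List.foldl_append, List.foldl_cons, List.foldl_nil, hfold st0]
      have hrx : r ≠ x := by
        intro hh; subst hh; exact hr (self_mem_Lf _ _ _)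
      rw [Function.update_apply, if_neg hrx]
      apply hu
      intro c hc hmm
      exact hr (mem_Lf_of_child Nn A ok x c r hx hb hc hmm)
    · intro m hm
      rw [List.foldl_append, List.foldl_cons, List.foldl_nil, hfold st0]
      rw [Lf_unfold Nn A ok x hx hb] at hm
      rcases List.mem_cons.mp hm with rfl | hmf
      · rw [Function.update_apply, if_pos rfl, hVAL]
      · obtain ⟨c, hc, hmc⟩ := List.mem_flatMap.mp hmf
        have hmx : m ≠ x := by
          intro hh; subst hh
          exact hxnot c hc hmc
        rw [Function.update_apply, if_neg hmx]
        exact hv c hc m hmc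


-- ---- the two per-node multiplications agree ----

lemma step_collapse (w f : Int) :
    PySem.Int.mod (w * PySem.Int.mod f pyMOD) pyMOD = PySem.Int.mod (w * f) pyMOD := by
  have hpos : (0 : Int) < pyMOD := by norm_num [pyMOD]
  rw [PySem.Int.mod_eq_emod_of_pos hpos, PySem.Int.mod_eq_emod_of_pos hpos,
    PySem.Int.mod_eq_emod_of_pos hpos]
  conv_lhs => rw [Int.mul_emod]
  rw [Int.emod_emod_of_dvd _ dvd_rfl, ← Int.mul_emod]

lemma rest_facts (Nn : Nat) (A : List Int) (ok : Ok Nn A) (n : Nat)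
    (hn : n ∈ (buildGr Nn A 0).reverse.flatMap (fun c => Tf (buildGr Nn A) Nn c)) :
    ∃ _ : Rch (parF Nn A) n, 1 ≤ n ∧ n ≤ A.length ∧ n ∈ Lf (buildGr Nn A) Nn 0 := by
  obtain ⟨c, hc, hnc⟩ := List.mem_flatMap.mp hn
  rw [List.mem_reverse] at hc
  obtain ⟨h1, h2, hp⟩ := (mem_buildGr Nn A 0 c).mp hc
  have hrc : Rch (parF Nn A) c := rch_child _ c 0 hp (rch_zero _)
  have hdcn : Desc (parF Nn A) c n :=
    (mem_Tf_iff Nn A ok Nn c hrc (Or.inr h2) (by omega) n).mp hnc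
  have hrn : Rch (parF Nn A) n := rch_of_desc _ c n hrc hdcn
  have hn1 : 1 ≤ n := by
    rcases Nat.eq_zero_or_pos n with rfl | hpos
    · obtain ⟨d, hd⟩ := hdcn
      rw [iter_fix _ 0 (parF_zero Nn A) d] at hd
      omega
    · exact hpos
  have hn2 : n ≤ A.length := by
    rcases rch_elem_bound Nn A n hrn 0 with h0 | hle
    · simp at h0; omega
    · simpa using hle
  refine ⟨hrn, hn1, hn2, ?_⟩
  exact (mem_Lf_iff Nn A ok Nn 0 (rch_zero _) (Or.inl rfl) (by omega) n).mpr hrn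

lemma step_eq (Nn : Nat) (A : List Int) (ok : Ok Nn A)
    (sbRaw : Nat → Nat → Nat) (st : Nat → List Nat)
    (hsb : ∀ m ∈ Lf (buildGr Nn A) Nn 0, sbRaw m = rowSpec (buildGr Nn A) Nn m)
    (hst : ∀ m ∈ Lf (buildGr Nn A) Nn 0, st m = Lf (buildGr Nn A) Nn m)
    (n : Nat) (hn1 : 1 ≤ n) (hn2 : n ≤ A.length) (hrn : Rch (parF Nn A) n)
    (w : Int) :
    stepF (buildGr Nn A) (parF Nn A) sbRaw w n
      = (let p := PySem.List.pyGetD A ((n : Int) - 1) 0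
         let cands : List Nat := (((buildGr Nn A) (pyIdxN Nn p)).filter (fun x => x ≠ n)).map
           (fun x => (st x).countP (fun v => v ≤ n))
         let f := cands.foldl (fun m c => m - (PySem.Int.powMod 2 c pyMOD - 1))
           (PySem.Int.powMod 2 (1 + cands.sum) pyMOD - 1)
         PySem.Int.mod (w * f) pyMOD) := by
  have hpcast : ((n : Int) - 1) = ((n - 1 : Nat) : Int) := by omega
  have hp : PySem.List.pyGetD A ((n : Int) - 1) 0 = A.getD (n - 1) 0 := by
    rw [hpcast, PySem.List.pyGetD_natCast]
  have hidx : pyIdxN Nn (A.getD (n - 1) 0) = parF Nn A n := by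
    unfold parF
    rw [if_pos ⟨hn1, hn2⟩]
  have hrpar : Rch (parF Nn A) (parF Nn A n) := by
    have := rch_iter (parF Nn A) (parF_zero Nn A) n hrn 1
    rwa [Function.iterate_one] at this
  have hcands : (((buildGr Nn A) (parF Nn A n)).filter (fun x => x ≠ n)).map
        (fun x => (st x).countP (fun v => v ≤ n))
      = (((buildGr Nn A) (parF Nn A n)).filter (fun x => x ≠ n)).map
        (fun x => sbRaw x n) := by
    apply List.map_congr_left
    intro x hxf
    have hxg : x ∈ buildGr Nn A (parF Nn A n) := List.mem_of_mem_filter hxf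
    obtain ⟨hx1, hx2, hxp⟩ := (mem_buildGr Nn A _ x).mp hxg
    have hrx : Rch (parF Nn A) x := rch_child _ x _ hxp hrpar
    have hx0 : x ∈ Lf (buildGr Nn A) Nn 0 :=
      (mem_Lf_iff Nn A ok Nn 0 (rch_zero _) (Or.inl rfl) (by omega) x).mpr hrx
    rw [hst x hx0, hsb x hx0]
    unfold rowSpec
    rw [if_pos (by have := ok.1; omega)]
  show _ = PySem.Int.mod (w * _) pyMOD
  rw [hp, hidx, hcands]
  rw [← step_collapse]
  rfl


lemma dfs2_root (Nn : Nat) (A : List Int) (ok : Ok Nn A) (sb : Nat → Nat → Nat) :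
    dfsA2 (buildGr Nn A) sb (2 * Nn + 1) [(0, -1)] 1
      = ((buildGr Nn A 0).reverse.flatMap (fun c => Tf (buildGr Nn A) Nn c)).foldl
          (stepF (buildGr Nn A) (parF Nn A) sb) 1 := by
  have hL : (Lf (buildGr Nn A) Nn 0).length ≤ Nn := length_Lf_root_le Nn A ok Nn (by omega)
  have hTlen : (Tf (buildGr Nn A) Nn 0).length = (Lf (buildGr Nn A) Nn 0).length :=
    length_Tf_eq _ _ _
  have hSsum : ((buildGr Nn A 0).reverse.map (fun c => (Tf (buildGr Nn A) Nn c).length)).sum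
      = (Tf (buildGr Nn A) Nn 0).length - 1 := by
    have := length_Tf_rec Nn A ok 0 (rch_zero _) (Or.inl rfl)
    omega
  rw [dfsA2]
  rw [if_neg (by norm_num)]
  have hfuel : 2 * Nn
      = (2 * Nn - ((buildGr Nn A 0).reverse.map
          (fun c => (Tf (buildGr Nn A) Nn c).length)).sum)
        + ((buildGr Nn A 0).reverse.map (fun c => (Tf (buildGr Nn A) Nn c).length)).sum := by
    omega
  rw [hfuel]
  rw [dfs2_children Nn A ok sb 0 (rch_zero _) (buildGr Nn A 0).reverse
    (fun c hc => by rwa [List.mem_reverse] at hc) [] 1 _]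
  rw [dfsA2_nil]

theorem solve_spec : Claim_equal_solve := by
  intro N A hdom hpre
  obtain ⟨hlen, hrange⟩ := hpre
  have hlen0 : (0 : Int) ≤ (A.length : Int) := Int.natCast_nonneg _
  have hnn : (0 : Int) ≤ N := by omega
  have hcast : ((N.toNat : Int)) = N := Int.toNat_of_nonneg hnn
  have ok : Ok N.toNat A := by
    refine ⟨by omega, ?_⟩
    intro a ha
    have := hrange a ha
    constructor <;> omega
  show solve N A = solve_alt N A
  unfold solve solve_alt
  simp only []
  set Nn := N.toNat with hNndef
  -- lengths
  have hL : (Lf (buildGr Nn A) Nn 0).length ≤ Nn := length_Lf_root_le Nn A ok Nn (by omega)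
  have hL1 : 1 ≤ (Lf (buildGr Nn A) Nn 0).length := length_Lf_pos _ _ _
  have hTlen : (Tf (buildGr Nn A) Nn 0).length = (Lf (buildGr Nn A) Nn 0).length :=
    length_Tf_eq _ _ _
  -- the preorder B computes
  have horder : dfsB (buildGr Nn A) (Nn + 1) [0] [] = Tf (buildGr Nn A) Nn 0 := by
    have hfuel : Nn + 1
        = (Nn + 1 - (Tf (buildGr Nn A) Nn 0).length) + (Tf (buildGr Nn A) Nn 0).length := by
      omega
    rw [hfuel, dfsB_comp Nn A ok Nn 0 (rch_zero _) (Or.inl rfl) (by omega) [] [] _,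
      dfsB_nil, List.nil_append]
  rw [horder]
  -- A's finished scoreboard rows
  have hsb : ∀ m ∈ Lf (buildGr Nn A) Nn 0,
      dfsA1 (buildGr Nn A) Nn (2 * Nn + 1) [(0, -1, 0)] (fun _ _ => 0) m
        = rowSpec (buildGr Nn A) Nn m := fun m hm => sbF_spec Nn A ok m hm
  -- B's finished subtree lists
  have hst := sweep_spec Nn A ok Nn 0 (rch_zero _) (Or.inl rfl) (by omega) (fun _ => [])
  -- A's second DFS: pop the root, then fold the children subtrees
  have hroot := dfs2_root Nn A ok
    (dfsA1 (buildGr Nn A) Nn (2 * Nn + 1) [(0, -1, 0)] (fun _ _ => 0))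
  rw [hroot]
  -- B's product loop: skip the root, then the same fold
  set stB := (Tf (buildGr Nn A) Nn 0).reverse.foldl
    (fun st n => Function.update st n ((buildGr Nn A n).foldl (fun acc c => acc ++ st c) [n]))
    (fun _ => ([] : List Nat)) with hstBdef
  rw [Tf_unfold Nn A ok 0 (rch_zero _) (Or.inl rfl), List.foldl_cons]
  rw [if_pos rfl]
  apply PySem.List.foldl_congr_mem
  intro acc n hn
  obtain ⟨hrn, hn1, hn2, hn0⟩ := rest_facts Nn A ok n hn
  rw [if_neg (by omega)]
  exact step_eq Nn A ok _ _ hsb hst.2 n hn1 hn2 hrn acc
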